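-- pv_equiv track=rewrite | github.com/foxlf823/dygiepp | files_for_discontinuous_ner/result_analysis.py | determine_rod
-- ===== SOURCE A (Python) =====
-- def determine_rod(predict_entities):
--     predict_entities_rod = [''] * len(predict_entities)
--     for idx, entity in enumerate(predict_entities):
--         if len(entity) > 1:
--             predict_entities_rod[idx] = 'd'
--             continue
--         find_overlapped = False
--         for other in predict_entities:
--             if entity == other:
--                 continue
--             for entity_span in entity:
--                 entity_span_start = entity_span[0]
--                 entity_span_end = entity_span[1]
--                 for other_span in other:
--                     other_span_start = other_span[0]
--                     other_span_end = other_span[1]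
--                     if entity_span_start >= other_span_start and entity_span_start <= other_span_end:
--                         find_overlapped = True
--                         break
--                     if entity_span_end >= other_span_start and entity_span_end <= other_span_end:
--                         find_overlapped = True
--                         break
--                 if find_overlapped:
--                     break
--             if find_overlapped:
--                 break
--         if find_overlapped:
--             predict_entities_rod[idx] = 'o'
--         else:
--             predict_entities_rod[idx] = 'r'
--     return predict_entities_rod
-- ===== SOURCE B (Python) =====
-- from bisect import bisect_left, bisect_right
-- from collections import Counter
--
--
-- def determine_rod(predict_entities):
--     # Spans with start > end cover no position, so they never create an overlap.
--     spans = [sp for ent in predict_entities for sp in ent if sp[0] <= sp[1]]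
--     starts = sorted(sp[0] for sp in spans)
--     ends = sorted(sp[1] for sp in spans)
--     cnt = Counter(tuple(map(tuple, ent)) for ent in predict_entities)
--
--     def cover(x):
--         # number of valid spans (a, b) with a <= x <= b
--         return bisect_right(starts, x) - bisect_left(ends, x)
--
--     result = []
--     for ent in predict_entities:
--         if len(ent) > 1:
--             result.append('d')
--         elif not ent:
--             result.append('r')
--         else:
--             s, t = ent[0]
--             # copies of this entity (itself included) each contribute one
--             # covering span at s and at t iff the span is valid
--             k = cnt[tuple(map(tuple, ent))] if s <= t else 0
--             result.append('o' if cover(s) > k or cover(t) > k else 'r')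
--     return result
-- ===== Notes on version B (the rewrite author's own statement) =====
-- stated objective: alternative
-- what changed: Replaces A's per-entity nested scan over all other entities' spans by one global coverage index: collect all valid spans once, sort their starts and ends, answer each endpoint query with two bisections, and subtract the Counter-count of value-equal entity copies to realize A's self-exclusion (worst case O(ns log ns) vs A's O(n^2 s^2), but A's early breaks make the two comparable on typical data).
import Mathlib
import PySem

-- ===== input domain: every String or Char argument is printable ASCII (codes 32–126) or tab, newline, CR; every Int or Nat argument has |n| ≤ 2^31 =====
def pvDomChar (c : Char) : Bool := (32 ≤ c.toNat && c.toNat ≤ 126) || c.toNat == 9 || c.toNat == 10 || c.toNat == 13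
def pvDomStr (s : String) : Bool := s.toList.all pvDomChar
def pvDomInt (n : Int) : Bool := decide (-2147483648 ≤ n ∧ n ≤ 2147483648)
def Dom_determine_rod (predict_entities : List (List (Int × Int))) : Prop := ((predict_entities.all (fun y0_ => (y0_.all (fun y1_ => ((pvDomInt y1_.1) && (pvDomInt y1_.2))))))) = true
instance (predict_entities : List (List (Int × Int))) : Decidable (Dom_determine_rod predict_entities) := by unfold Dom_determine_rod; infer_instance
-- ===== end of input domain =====

-- B replaces A's per-entity all-pairs span scan by one global sorted coverage index
-- (bisect counting of covering spans, minus the value-equal entity copies): an alternative algorithm.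

-- ===== PORT A =====
def determine_rod (predict_entities : List (List (Int × Int))) : List String :=
  predict_entities.map (fun entity =>
    if entity.length > 1 then "d"
    else
      let find_overlapped := predict_entities.any (fun other =>
        !(entity == other) && entity.any (fun entity_span =>
          other.any (fun other_span =>
            (decide (other_span.1 ≤ entity_span.1) && decide (entity_span.1 ≤ other_span.2)) ||
            (decide (other_span.1 ≤ entity_span.2) && decide (entity_span.2 ≤ other_span.2)))))
      if find_overlapped then "o" else "r")

-- ===== PORT B =====
def determine_rod_alt (predict_entities : List (List (Int × Int))) : List String :=
  let spans := predict_entities.flatMap (fun ent => ent.filter (fun sp => decide (sp.1 ≤ sp.2)))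
  let starts := PySem.List.sorted (spans.map (fun sp => sp.1)) (fun x => x)
  let ends := PySem.List.sorted (spans.map (fun sp => sp.2)) (fun x => x)
  let cnt := PySem.Dict.counter predict_entities
  let cover := fun (x : Int) =>
    (PySem.List.bisectRight starts x : Int) - (PySem.List.bisectLeft ends x : Int)
  predict_entities.map (fun ent =>
    if ent.length > 1 then "d"
    else
      match ent with
      | [] => "r"
      | sp :: _ =>
        let k : Int := if sp.1 ≤ sp.2 then cnt.getD ent 0 else 0
        if cover sp.1 > k || cover sp.2 > k then "o" else "r")

-- ===== PRECONDITION & SPEC =====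
def Spec_determine_rod (predict_entities : List (List (Int × Int))) (out : List String) : Prop := out = determine_rod_alt predict_entities
instance (predict_entities : List (List (Int × Int))) (out : List String) : Decidable (Spec_determine_rod predict_entities out) := by unfold Spec_determine_rod; infer_instance

-- ===== CLAIM (what is proved, stated in full; the proofs are below) =====
def Claim_equal_determine_rod : Prop := ∀ (predict_entities : List (List (Int × Int))), Dom_determine_rod predict_entities → Spec_determine_rod predict_entities (determine_rod predict_entities)

-- ===== LEMMAS AND PROOFS =====

def pvCovers (x : Int) (sp : Int × Int) : Bool := decide (sp.1 ≤ x) && decide (x ≤ sp.2)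

theorem bisectLeft_eq_countP (xs : List Int) (x : Int)
    (h : xs.Pairwise (· ≤ ·)) :
    PySem.List.bisectLeft xs x = xs.countP (fun a => decide (a < x)) := by
  obtain ⟨hle, hlo, hhi⟩ := PySem.List.bisectLeft_spec xs x h
  set i := PySem.List.bisectLeft xs x with hi
  have hsplit := List.take_append_drop i xs
  have h1 : (xs.take i).countP (fun a => decide (a < x)) = (xs.take i).length := by
    apply List.countP_eq_length.mpr
    intro a ha
    obtain ⟨j, hj, rfl⟩ := List.mem_iff_getElem.mp ha
    have hj' : j < i := lt_of_lt_of_le hj (by simp [List.length_take])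
    have hjx : j < xs.length := lt_of_lt_of_le hj (by simp [List.length_take])
    rw [List.getElem_take]
    simpa using hlo j hjx hj'
  have h2 : (xs.drop i).countP (fun a => decide (a < x)) = 0 := by
    apply List.countP_eq_zero.mpr
    intro a ha
    obtain ⟨j, hj, rfl⟩ := List.mem_iff_getElem.mp ha
    have hj' : j < xs.length - i := by simpa [List.length_drop] using hj
    have hjx : i + j < xs.length := by omega
    rw [List.getElem_drop]
    have := hhi (i + j) hjx (Nat.le_add_right _ _)
    simp; omega
  calc i = (xs.take i).length := by simp [List.length_take]; omega
    _ = (xs.take i).countP (fun a => decide (a < x)) + (xs.drop i).countP (fun a => decide (a < x)) := by rw [h1, h2]; omega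
    _ = xs.countP (fun a => decide (a < x)) := by rw [← List.countP_append, hsplit]

theorem sub_count_eq_cover (spans : List (Int × Int)) (x : Int)
    (hv : ∀ sp ∈ spans, sp.1 ≤ sp.2) :
    (spans.countP (fun sp => decide (sp.1 ≤ x)) : Int)
      - spans.countP (fun sp => decide (sp.2 < x))
      = spans.countP (pvCovers x) := by
  induction spans with
  | nil => simp
  | cons sp t ih =>
    have hsp := hv sp (by simp)
    have ht : ∀ q ∈ t, q.1 ≤ q.2 := fun q hq => hv q (by simp [hq])
    have := ih ht
    simp only [List.countP_cons, pvCovers] at *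
    by_cases h1 : sp.1 ≤ x <;> by_cases h2 : x ≤ sp.2 <;>
      simp [h1, h2] <;> omega

theorem sum_ge_count_mul (pe : List (List (Int × Int))) (e : List (Int × Int))
    (g : List (Int × Int) → Nat) :
    pe.count e * g e ≤ (pe.map g).sum := by
  induction pe with
  | nil => simp
  | cons h t ih =>
    by_cases he : h = e
    · subst he
      have hc : (h :: t).count h = t.count h + 1 := by simp
      rw [hc]
      simp only [List.map_cons, List.sum_cons]
      have hmul : (t.count h + 1) * g h = t.count h * g h + g h := by ring
      omega
    · have hc : (h :: t).count e = t.count e := by simp [he]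
      rw [hc]; simp only [List.map_cons, List.sum_cons]; omega

theorem sum_gt_count_iff (pe : List (List (Int × Int))) (e : List (Int × Int))
    (g : List (Int × Int) → Nat) :
    pe.count e * g e < (pe.map g).sum ↔ ∃ o ∈ pe, o ≠ e ∧ 0 < g o := by
  induction pe with
  | nil => simp
  | cons h t ih =>
    have haux := sum_ge_count_mul t e g
    by_cases he : h = e
    · subst he
      have hc : (h :: t).count h = t.count h + 1 := by simp
      rw [hc]
      simp only [List.map_cons, List.sum_cons]
      have hmul : (t.count h + 1) * g h = t.count h * g h + g h := by ring
      constructor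
      · intro hgt
        obtain ⟨o, ho, hne, hp⟩ := ih.mp (by omega)
        exact ⟨o, by simp [ho], hne, hp⟩
      · rintro ⟨o, ho, hne, hp⟩
        have ho' : o ∈ t := by rcases List.mem_cons.mp ho with h|h; exact absurd h hne; exact h
        have := ih.mpr ⟨o, ho', hne, hp⟩
        omega
    · have hc : (h :: t).count e = t.count e := by simp [he]
      rw [hc]
      simp only [List.map_cons, List.sum_cons]
      constructor
      · intro hgt
        by_cases hg : 0 < g h
        · exact ⟨h, by simp, he, hg⟩
        · have : t.count e * g e < (t.map g).sum := by omega
          obtain ⟨o, ho, hne, hp⟩ := ih.mp this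
          exact ⟨o, by simp [ho], hne, hp⟩
      · rintro ⟨o, ho, hne, hp⟩
        rcases List.mem_cons.mp ho with rfl | ho'
        · omega
        · have := ih.mpr ⟨o, ho', hne, hp⟩; omega
theorem bisectRight_eq_countP (xs : List Int) (x : Int)
    (h : xs.Pairwise (· ≤ ·)) :
    PySem.List.bisectRight xs x = xs.countP (fun a => decide (a ≤ x)) := by
  obtain ⟨hle, hlo, hhi⟩ := PySem.List.bisectRight_spec xs x h
  set i := PySem.List.bisectRight xs x with hi
  have hsplit := List.take_append_drop i xs
  have h1 : (xs.take i).countP (fun a => decide (a ≤ x)) = (xs.take i).length := by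
    apply List.countP_eq_length.mpr
    intro a ha
    obtain ⟨j, hj, rfl⟩ := List.mem_iff_getElem.mp ha
    have hj' : j < i := lt_of_lt_of_le hj (by simp [List.length_take])
    have hjx : j < xs.length := lt_of_lt_of_le hj (by simp [List.length_take])
    rw [List.getElem_take]
    simpa using hlo j hjx hj'
  have h2 : (xs.drop i).countP (fun a => decide (a ≤ x)) = 0 := by
    apply List.countP_eq_zero.mpr
    intro a ha
    obtain ⟨j, hj, rfl⟩ := List.mem_iff_getElem.mp ha
    have hj' : j < xs.length - i := by simpa [List.length_drop] using hj
    have hjx : i + j < xs.length := by omega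
    rw [List.getElem_drop]
    have := hhi (i + j) hjx (Nat.le_add_right _ _)
    simp; omega
  calc i = (xs.take i).length := by simp [List.length_take]; omega
    _ = (xs.take i).countP (fun a => decide (a ≤ x)) + (xs.drop i).countP (fun a => decide (a ≤ x)) := by rw [h1, h2]; omega
    _ = xs.countP (fun a => decide (a ≤ x)) := by rw [← List.countP_append, hsplit]

theorem countP_flatMap_sum (pe : List (List (Int × Int)))
    (f : List (Int × Int) → List (Int × Int)) (p : (Int × Int) → Bool) :
    (pe.flatMap f).countP p = (pe.map (fun ent => (f ent).countP p)).sum := by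
  induction pe with
  | nil => simp
  | cons h t ih => simp [List.flatMap_cons, List.countP_append, ih]

theorem countP_filter_covers (ent : List (Int × Int)) (x : Int) :
    (ent.filter (fun sp => decide (sp.1 ≤ sp.2))).countP (pvCovers x) = ent.countP (pvCovers x) := by
  rw [List.countP_filter]
  apply List.countP_congr
  intro a _
  by_cases h : pvCovers x a = true
  · have hv : a.1 ≤ a.2 := by
      simp [pvCovers] at h; omega
    simp [h, hv]
  · simp [Bool.eq_false_iff.mpr h]


theorem cover_sub (pe : List (List (Int × Int))) (x : Int) :
    (PySem.List.bisectRight (PySem.List.sorted ((pe.flatMap (fun ent => ent.filter (fun sp => decide (sp.1 ≤ sp.2)))).map (fun sp => sp.1)) (fun x => x)) x : Int)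
      - (PySem.List.bisectLeft (PySem.List.sorted ((pe.flatMap (fun ent => ent.filter (fun sp => decide (sp.1 ≤ sp.2)))).map (fun sp => sp.2)) (fun x => x)) x : Int)
      = ((pe.map (fun ent => ent.countP (pvCovers x))).sum : Int) := by
  set spans := pe.flatMap (fun ent => ent.filter (fun sp => decide (sp.1 ≤ sp.2))) with hspans
  have hvalid : ∀ sp ∈ spans, sp.1 ≤ sp.2 := by
    intro q hq
    rw [hspans] at hq
    simp only [List.mem_flatMap, List.mem_filter] at hq
    obtain ⟨ent, _, _, h⟩ := hq
    exact of_decide_eq_true h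
  have hR : PySem.List.bisectRight (PySem.List.sorted (spans.map (fun sp => sp.1)) (fun x => x)) x
      = spans.countP (fun sp => decide (sp.1 ≤ x)) := by
    rw [bisectRight_eq_countP _ _ (by simpa using PySem.List.sorted_pairwise (spans.map (fun sp => sp.1)) (fun x => x))]
    rw [List.Perm.countP_congr (PySem.List.sorted_perm _ _ _) (fun a _ => rfl)]
    simp [List.countP_map]; rfl
  have hL : PySem.List.bisectLeft (PySem.List.sorted (spans.map (fun sp => sp.2)) (fun x => x)) x
      = spans.countP (fun sp => decide (sp.2 < x)) := by
    rw [bisectLeft_eq_countP _ _ (by simpa using PySem.List.sorted_pairwise (spans.map (fun sp => sp.2)) (fun x => x))]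
    rw [List.Perm.countP_congr (PySem.List.sorted_perm _ _ _) (fun a _ => rfl)]
    simp [List.countP_map]; rfl
  rw [hR, hL, sub_count_eq_cover spans x hvalid, hspans, countP_flatMap_sum]
  have heq : (pe.map (fun ent => (ent.filter (fun sp => decide (sp.1 ≤ sp.2))).countP (pvCovers x))).sum
      = (pe.map (fun ent => ent.countP (pvCovers x))).sum :=
    congrArg List.sum (List.map_congr_left fun ent _ => countP_filter_covers ent x)
  rw [heq, Nat.cast_list_sum, List.map_map]
  rfl

theorem gt_iff (pe : List (List (Int × Int))) (sp : Int × Int) (x : Int)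
    (hcx : [sp].countP (pvCovers x) = if sp.1 ≤ sp.2 then 1 else 0) :
    ((if sp.1 ≤ sp.2 then ((pe.count [sp] : Int)) else 0) < ((pe.map (fun ent => ent.countP (pvCovers x))).sum : Int))
      ↔ ∃ o ∈ pe, ¬([sp] = o) ∧ ∃ a ∈ o, pvCovers x a = true := by
  have hk : (if sp.1 ≤ sp.2 then ((pe.count [sp] : Int)) else 0)
      = ((pe.count [sp] * ([sp].countP (pvCovers x)) : Nat) : Int) := by
    rw [hcx]; split_ifs <;> push_cast <;> ring
  have hsum : ((pe.map (fun ent => ((ent.countP (pvCovers x) : Nat) : Int))).sum)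
      = (((pe.map (fun ent => ent.countP (pvCovers x))).sum : Nat) : Int) := by
    rw [Nat.cast_list_sum, List.map_map]; rfl
  rw [hk, hsum, Nat.cast_lt, sum_gt_count_iff pe [sp] (fun ent => ent.countP (pvCovers x))]
  constructor
  · rintro ⟨o, ho, hne, hp⟩
    exact ⟨o, ho, fun h => hne h.symm, List.countP_pos_iff.mp hp⟩
  · rintro ⟨o, ho, hne, hp⟩
    exact ⟨o, ho, fun h => hne h.symm, List.countP_pos_iff.mpr hp⟩

theorem determine_rod_eq_alt : ∀ pe, determine_rod pe = determine_rod_alt pe := by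
  intro pe
  simp only [determine_rod, determine_rod_alt]
  refine List.map_congr_left fun ent hent => ?_
  by_cases hlen : ent.length > 1
  · simp [hlen]
  · simp only [if_neg hlen]
    rcases ent with _ | ⟨sp, rest⟩
    · simp
    · rcases rest with _ | ⟨b, rest2⟩
      · have h1 := cover_sub pe sp.1
        have h2 := cover_sub pe sp.2
        have hcx1 : [sp].countP (pvCovers sp.1) = if sp.1 ≤ sp.2 then 1 else 0 := by
          simp [List.countP_cons, pvCovers]
        have hcx2 : [sp].countP (pvCovers sp.2) = if sp.1 ≤ sp.2 then 1 else 0 := by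
          simp [List.countP_cons, pvCovers]
        simp only [List.any_cons, List.any_nil, Bool.or_false]
        refine if_congr ?_ rfl rfl
        simp only [PySem.Dict.getD_counter, gt_iff_lt, Bool.or_eq_true, decide_eq_true_iff,
          h1, h2, List.any_eq_true, Bool.and_eq_true, Bool.not_eq_eq_eq_not, Bool.not_true,
          beq_eq_false_iff_ne, ne_eq]
        rw [gt_iff pe sp sp.1 hcx1, gt_iff pe sp sp.2 hcx2]
        constructor
        · rintro ⟨o, ho, hne, a, ha, hc⟩
          rcases hc with hc | hc
          · exact Or.inl ⟨o, ho, hne, a, ha, by simp [pvCovers]; tauto⟩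
          · exact Or.inr ⟨o, ho, hne, a, ha, by simp [pvCovers]; tauto⟩
        · rintro (⟨o, ho, hne, a, ha, hc⟩ | ⟨o, ho, hne, a, ha, hc⟩)
          · refine ⟨o, ho, hne, a, ha, ?_⟩
            simp [pvCovers] at hc; tauto
          · refine ⟨o, ho, hne, a, ha, ?_⟩
            simp [pvCovers] at hc; tauto
      · exact absurd (by simp) hlen

-- ===== VERDICT (by name: the statement is the Claim_ definition above) =====
theorem determine_rod_spec : Claim_equal_determine_rod := by
  intro pe _
  exact determine_rod_eq_alt pe
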